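-- pv_equiv track=rewrite | github.com/SivaShankar-Juthuka/Practice | Easy/Rightmost different bit/rightmost-different-bit.py | posOfRightMostDiffBit
-- ===== SOURCE A (Python) =====
-- def posOfRightMostDiffBit(m,n):
--     #Your code here
--     s1 = bin(m)[2:]
--     s2 = bin(n)[2:]
--     if(len(s1) > len(s2)):
--         k = len(s1)- len(s2)
--         s2 = k*'0'+s2
--     if(len(s2) > len(s1)):
--         k = len(s2)- len(s1)
--         s1 = k*'0'+s1
--     for i in range(len(s1)-1, -1, -1):
--         if(s1[i] != s2[i]):
--             return len(s1) - i
--     return -1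
-- ===== SOURCE B (Python) =====
-- def posOfRightMostDiffBit(m, n):
--     x = m ^ n
--     if x == 0:
--         return -1
--     pos = 1
--     while x & 1 == 0:
--         x >>= 1
--         pos += 1
--     return pos
-- ===== Notes on version B (the rewrite author's own statement) =====
-- stated objective: simpler
-- what changed: Replaces binary-string construction, left zero-padding and a right-to-left character scan with pure integer arithmetic: xor the inputs once and count trailing zero bits of the xor with a shift loop.
-- outside the precondition, e.g. on posOfRightMostDiffBit(-5, 3): A returns 2, B returns 4
import Mathlib
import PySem

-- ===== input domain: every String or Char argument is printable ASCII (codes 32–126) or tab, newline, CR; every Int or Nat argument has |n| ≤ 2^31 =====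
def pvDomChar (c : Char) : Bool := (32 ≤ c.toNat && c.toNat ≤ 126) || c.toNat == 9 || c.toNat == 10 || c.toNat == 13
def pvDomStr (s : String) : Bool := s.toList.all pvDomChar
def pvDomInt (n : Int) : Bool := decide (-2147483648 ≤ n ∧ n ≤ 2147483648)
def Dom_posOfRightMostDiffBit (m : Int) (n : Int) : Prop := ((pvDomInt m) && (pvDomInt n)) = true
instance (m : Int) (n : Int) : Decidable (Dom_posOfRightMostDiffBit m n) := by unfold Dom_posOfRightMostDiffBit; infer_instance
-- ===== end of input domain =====

-- B replaces A's binary-string building, zero-padding and right-to-left character scan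
-- with integer arithmetic: xor once, then count trailing zero bits of the xor (simpler).

-- ===== PORT A =====

-- character for a binary digit (0 or 1)
def pvBitChar (b : Nat) : Char := if b = 1 then '1' else '0'

-- binary digits of a Nat, most-significant first ([] for 0); the digit part of Python's bin()
def pvNatBin (a : Nat) : List Char :=
  if a = 0 then [] else pvNatBin (a / 2) ++ [pvBitChar (a % 2)]

-- bin(m)[2:] as a list of characters; for negative m, bin(m) = "-0b…" so [2:] keeps a 'b'
-- (the [2:] slice with nonnegative bound is exactly List.drop 2, applied here directly)
def pvBinDrop2 (m : Int) : List Char :=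
  if m < 0 then 'b' :: (if m.natAbs = 0 then ['0'] else pvNatBin m.natAbs)
  else if m = 0 then ['0'] else pvNatBin m.toNat

-- the for-loop: for i in range(len(s1)-1, -1, -1): if s1[i] != s2[i]: return len(s1)-i
def pvALoop (s1 s2 : List Char) : List Int → Int
  | [] => -1
  | i :: rest =>
    match PySem.List.pyGet? s1 i, PySem.List.pyGet? s2 i with
    | some c1, some c2 => if c1 ≠ c2 then (s1.length : Int) - i else pvALoop s1 s2 rest
    | _, _ => -1   -- unreachable: loop indices are in range (Python would raise IndexError)

def posOfRightMostDiffBit (m : Int) (n : Int) : Int :=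
  let s1 := pvBinDrop2 m
  let s2 := pvBinDrop2 n
  let s2 := if s1.length > s2.length then List.replicate (s1.length - s2.length) '0' ++ s2 else s2
  let s1 := if s2.length > s1.length then List.replicate (s2.length - s1.length) '0' ++ s1 else s1
  pvALoop s1 s2 (PySem.List.pyRange ((s1.length : Int) - 1) (-1) (-1))

-- ===== PORT B =====

-- while x & 1 == 0: x >>= 1; pos += 1  (x ≠ 0 in the guard is only a totality guard:
-- B only enters the loop with x ≠ 0; Int `%`/`/` by 2 agree with Python's here)
def pvRmLoop (x : Int) (pos : Int) : Int :=
  if h : x % 2 = 0 ∧ x ≠ 0 then pvRmLoop (x / 2) (pos + 1) else pos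
termination_by x.natAbs
decreasing_by omega

def posOfRightMostDiffBit_alt (m : Int) (n : Int) : Int :=
  let x := PySem.Int.bxor m n
  if x = 0 then -1 else pvRmLoop x 1

-- ===== PRECONDITION & SPEC =====
-- Pre_ excludes inputs with a negative argument, on which A's bin(m)[2:] leaves a stray 'b'
-- (and for mixed signs misaligned sign characters) inside the compared strings, so A's value
-- there is an accident of the slicing, not the rightmost-different-bit position (e.g. A(-5,3)=2);
-- the task's natural domain is the non-negative integers.
def Pre_posOfRightMostDiffBit (m : Int) (n : Int) : Prop := 0 ≤ m ∧ 0 ≤ n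
instance (m : Int) (n : Int) : Decidable (Pre_posOfRightMostDiffBit m n) := by
  unfold Pre_posOfRightMostDiffBit; infer_instance

def pvWitness_posOfRightMostDiffBit : Int × Int := (11, 9)

def Spec_posOfRightMostDiffBit (m : Int) (n : Int) (out : Int) : Prop := out = posOfRightMostDiffBit_alt m n
instance (m : Int) (n : Int) (out : Int) : Decidable (Spec_posOfRightMostDiffBit m n out) := by unfold Spec_posOfRightMostDiffBit; infer_instance

-- ===== CLAIM (what is proved, stated in full; the proofs are below) =====
def Claim_equal_posOfRightMostDiffBit : Prop := ∀ (m : Int) (n : Int), Dom_posOfRightMostDiffBit m n → Pre_posOfRightMostDiffBit m n → Spec_posOfRightMostDiffBit m n (posOfRightMostDiffBit m n)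

-- ===== LEMMAS AND PROOFS =====

-- bits of a Nat, least-significant first ([] for 0)
def pvBL (a : Nat) : List Char :=
  if a = 0 then [] else pvBitChar (a % 2) :: pvBL (a / 2)

-- first-difference scan over two equal-length reversed strings, 1-indexed
def pvRevFD : List Char → List Char → Int → Int
  | c1 :: r1, c2 :: r2, p => if c1 ≠ c2 then p else pvRevFD r1 r2 (p + 1)
  | _, _, _ => -1

-- first-difference scan padding the shorter list with '0'
def pvCmp : List Char → List Char → Int → Int
  | [], [], _ => -1
  | c :: r1, [], p => if c ≠ '0' then p else pvCmp r1 [] (p + 1)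
  | [], c :: r2, p => if c ≠ '0' then p else pvCmp [] r2 (p + 1)
  | c1 :: r1, c2 :: r2, p => if c1 ≠ c2 then p else pvCmp r1 r2 (p + 1)

theorem pvALoop_eq_revFD (s1 s2 : List Char) (hlen : s1.length = s2.length)
    (j : Nat) (hj : j ≤ s1.length) :
    pvALoop s1 s2 (PySem.List.pyRange ((j : Int) - 1) (-1) (-1)) =
      pvRevFD ((s1.take j).reverse) ((s2.take j).reverse) ((s1.length : Int) - j + 1) := by
  induction j with
  | zero =>
    rw [show ((0 : Nat) : Int) - 1 = -1 by omega,
        PySem.List.pyRange_neg_one_eq_nil (by omega)]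
    simp [pvALoop, pvRevFD]
  | succ j ih =>
    have hj' : j < s1.length := by omega
    have hj2 : j < s2.length := by omega
    rw [show ((j + 1 : Nat) : Int) - 1 = (j : Int) by push_cast; ring,
        PySem.List.pyRange_neg_one_cons (by omega)]
    simp only [pvALoop, PySem.List.pyGet?_natCast, List.getElem?_eq_getElem hj',
      List.getElem?_eq_getElem hj2]
    rw [List.take_add_one, List.take_add_one, List.getElem?_eq_getElem hj',
        List.getElem?_eq_getElem hj2]
    simp only [Option.toList_some, List.reverse_append, List.reverse_singleton,
      List.singleton_append, pvRevFD]
    by_cases hc : s1[j] = s2[j]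
    · simp only [hc, ne_eq, not_true_eq_false, if_false]
      rw [ih (by omega)]
      congr 1
      push_cast; ring
    · simp only [ne_eq, hc, not_false_eq_true, if_true]
      push_cast; ring

theorem pvRevFD_symm (r1 r2 : List Char) (p : Int) : pvRevFD r1 r2 p = pvRevFD r2 r1 p := by
  induction r1 generalizing r2 p with
  | nil => cases r2 <;> simp [pvRevFD]
  | cons c1 t1 ih =>
    cases r2 with
    | nil => simp [pvRevFD]
    | cons c2 t2 =>
      simp only [pvRevFD]
      rw [ih]
      by_cases h : c1 = c2 <;> simp [h, eq_comm]

theorem pvCmp_symm (r1 r2 : List Char) (p : Int) : pvCmp r1 r2 p = pvCmp r2 r1 p := by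
  induction r1 generalizing r2 p with
  | nil =>
    induction r2 generalizing p with
    | nil => simp [pvCmp]
    | cons c2 t2 ih2 => simp only [pvCmp]; rw [ih2]
  | cons c1 t1 ih =>
    cases r2 with
    | nil =>
      simp only [pvCmp]
      rw [ih]
    | cons c2 t2 =>
      simp only [pvCmp]
      rw [ih]
      by_cases h : c1 = c2 <;> simp [h, eq_comm]

theorem pvRevFD_pad (r1 r2 : List Char) (k : Nat) (p : Int)
    (h : r1.length = r2.length + k) :
    pvRevFD r1 (r2 ++ List.replicate k '0') p = pvCmp r1 r2 p := by
  induction r1 generalizing r2 k p with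
  | nil =>
    have : r2 = [] := by
      cases r2 with
      | nil => rfl
      | cons c t => simp at h; omega
    subst this
    have : k = 0 := by simp at h; omega
    subst this
    simp [pvRevFD, pvCmp]
  | cons c1 t1 ih =>
    cases r2 with
    | nil =>
      have hk : k = t1.length + 1 := by simp at h; omega
      subst hk
      simp only [List.nil_append, List.replicate_succ, pvRevFD, pvCmp]
      by_cases hc : c1 = '0'
      · simp only [hc, ne_eq, not_true_eq_false, if_false]
        have := ih (r2 := []) (k := t1.length) (p := p + 1) (by simp)
        simpa using this
      · simp [hc]
    | cons c2 t2 =>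
      simp only [List.cons_append, pvRevFD, pvCmp]
      by_cases hc : c1 = c2
      · simp only [hc, ne_eq, not_true_eq_false, if_false]
        exact ih _ _ _ (by simp at h ⊢; omega)
      · simp [hc]

-- reverse of the digit string is the LSB-first bit list
theorem pvNatBin_reverse (a : Nat) : (pvNatBin a).reverse = pvBL a := by
  induction a using Nat.strong_induction_on with
  | _ a ih =>
    rw [pvNatBin, pvBL]
    by_cases h : a = 0
    · simp [h]
    · simp only [h, if_false]
      rw [List.reverse_append, List.reverse_singleton, List.singleton_append,
          ih (a / 2) (by omega)]

-- an extra '0' on either side does not change the padded comparison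
theorem pvCmp_zero_left (r : List Char) (p : Int) : pvCmp ['0'] r p = pvCmp [] r p := by
  cases r with
  | nil => simp [pvCmp]
  | cons c t =>
    simp only [pvCmp]
    by_cases h : c = '0' <;> simp [h, eq_comm]

-- step form of the padded comparison on bit lists
theorem pvCmp_bl_step (a b : Nat) (p : Int) :
    pvCmp (pvBL a) (pvBL b) p =
      if a = 0 ∧ b = 0 then -1
      else if a % 2 ≠ b % 2 then p
      else pvCmp (pvBL (a / 2)) (pvBL (b / 2)) (p + 1) := by
  have hbl : ∀ u : Nat, pvBL u = if u = 0 then [] else pvBitChar (u % 2) :: pvBL (u / 2) :=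
    fun u => by rw [pvBL]
  have hz : ∀ u : Nat, (pvBitChar (u % 2) = '0') ↔ u % 2 = 0 := by
    intro u
    have : u % 2 = 0 ∨ u % 2 = 1 := by omega
    rcases this with h | h <;> simp [pvBitChar, h]
  have heq : ∀ u v : Nat, (pvBitChar (u % 2) = pvBitChar (v % 2)) ↔ u % 2 = v % 2 := by
    intro u v
    have hu : u % 2 = 0 ∨ u % 2 = 1 := by omega
    have hv : v % 2 = 0 ∨ v % 2 = 1 := by omega
    rcases hu with h1 | h1 <;> rcases hv with h2 | h2 <;> simp [pvBitChar, h1, h2]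
  by_cases ha : a = 0 <;> by_cases hb : b = 0
  · subst ha; subst hb
    rw [hbl 0]
    simp [pvCmp]
  · subst ha
    rw [hbl 0, if_pos rfl, hbl b, if_neg hb]
    rw [if_neg (by simp [hb])]
    simp only [pvCmp]
    by_cases hp : b % 2 = 0
    · rw [if_neg (show ¬ (pvBitChar (b % 2) ≠ '0') by simp [(hz b).mpr hp]),
          if_neg (show ¬ ((0:Nat) % 2 ≠ b % 2) by omega)]
    · rw [if_pos (show pvBitChar (b % 2) ≠ '0' by simp [hz b, hp]),
          if_pos (show (0:Nat) % 2 ≠ b % 2 by omega)]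
  · subst hb
    rw [hbl a, if_neg ha, hbl 0, if_pos rfl]
    rw [if_neg (by simp [ha])]
    simp only [pvCmp]
    by_cases hp : a % 2 = 0
    · rw [if_neg (show ¬ (pvBitChar (a % 2) ≠ '0') by simp [(hz a).mpr hp]),
          if_neg (show ¬ (a % 2 ≠ (0:Nat) % 2) by omega)]
    · rw [if_pos (show pvBitChar (a % 2) ≠ '0' by simp [hz a, hp]),
          if_pos (show a % 2 ≠ (0:Nat) % 2 by omega)]
  · rw [hbl a, if_neg ha, hbl b, if_neg hb]
    rw [if_neg (by simp [ha])]
    simp only [pvCmp]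
    by_cases hp : a % 2 = b % 2
    · rw [if_neg (show ¬ (pvBitChar (a % 2) ≠ pvBitChar (b % 2)) by simp [(heq a b).mpr hp]),
          if_neg (show ¬ (a % 2 ≠ b % 2) by omega)]
    · rw [if_pos (show pvBitChar (a % 2) ≠ pvBitChar (b % 2) by simp [heq a b, hp]),
          if_pos (show a % 2 ≠ b % 2 by omega)]

-- main bridge: padded comparison of bit lists = xor trailing-zero loop
theorem pvCmp_bl_eq_rmLoop (a b : Nat) (p : Int) :
    pvCmp (pvBL a) (pvBL b) p =
      if a = b then -1 else pvRmLoop ((a ^^^ b : Nat) : Int) p := by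
  have key : ∀ N a b p, a + b ≤ N →
      pvCmp (pvBL a) (pvBL b) p =
        if a = b then -1 else pvRmLoop ((a ^^^ b : Nat) : Int) p := by
    intro N
    induction N with
    | zero =>
      intro a b p h
      have ha : a = 0 := by omega
      have hb : b = 0 := by omega
      subst ha; subst hb
      rw [pvBL]
      simp [pvCmp]
    | succ N ihN =>
      intro a b p h
      rw [pvCmp_bl_step]
      by_cases h0 : a = 0 ∧ b = 0
      · simp [h0.1, h0.2]
      · rw [if_neg h0]
        by_cases hp : a % 2 = b % 2
        · rw [if_neg (by simpa using hp)]
          have hlt : a / 2 + b / 2 ≤ N := by omega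
          rw [ihN (a / 2) (b / 2) (p + 1) hlt]
          by_cases hab : a = b
          · rw [if_pos (by omega), if_pos hab]
          · have hhalf : ¬ (a / 2 = b / 2) := by omega
            rw [if_neg hhalf, if_neg hab]
            have hx0 : a ^^^ b ≠ 0 := by
              simpa [Nat.xor_eq_zero_iff] using hab
            have hx2 : (a ^^^ b) % 2 = 0 := by
              have h1 : ¬ ((a ^^^ b) % 2 = 1) := by
                rw [Nat.xor_mod_two_eq_one]
                simp only [not_not]
                omega
              omega
            conv_rhs => rw [pvRmLoop]
            rw [dif_pos (⟨by omega, by omega⟩ :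
              ((a ^^^ b : Nat) : Int) % 2 = 0 ∧ ((a ^^^ b : Nat) : Int) ≠ 0)]
            have hdiv : ((a ^^^ b : Nat) : Int) / 2 = (((a ^^^ b) / 2 : Nat) : Int) := by
              omega
            rw [hdiv, Nat.xor_div_two]
        · rw [if_pos (by simpa using hp)]
          have hab : a ≠ b := by omega
          rw [if_neg hab]
          have hx1 : (a ^^^ b) % 2 = 1 := by
            rw [Nat.xor_mod_two_eq_one]; omega
          rw [pvRmLoop, dif_neg (by omega)]
  exact key (a + b) a b p le_rfl

-- padding + reversed scan of the A port equals the '0'-padded comparison of the reversed strings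
theorem pvScan_eq_cmp (t1 t2 s2 s1 : List Char)
    (h2 : s2 = if t1.length > t2.length then List.replicate (t1.length - t2.length) '0' ++ t2 else t2)
    (h1 : s1 = if s2.length > t1.length then List.replicate (s2.length - t1.length) '0' ++ t1 else t1) :
    pvALoop s1 s2 (PySem.List.pyRange ((s1.length : Int) - 1) (-1) (-1)) =
    pvCmp t1.reverse t2.reverse 1 := by
  subst h2; subst h1
  rcases lt_trichotomy t1.length t2.length with hlt | heqL | hgt
  · rw [if_neg (show ¬ (t1.length > t2.length) by omega)]
    rw [if_pos (show t2.length > t1.length by omega)]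
    have hlen : (List.replicate (t2.length - t1.length) '0' ++ t1).length = t2.length := by
      simp; omega
    have := pvALoop_eq_revFD (List.replicate (t2.length - t1.length) '0' ++ t1) t2
      (by rw [hlen]) (List.replicate (t2.length - t1.length) '0' ++ t1).length le_rfl
    rw [List.take_length, List.take_of_length_le (by rw [hlen])] at this
    rw [this, List.reverse_append, List.reverse_replicate]
    rw [show ((List.replicate (t2.length - t1.length) '0' ++ t1).length : Int) -
        ((List.replicate (t2.length - t1.length) '0' ++ t1).length : Int) + 1 = 1 by ring]
    rw [pvRevFD_symm, pvRevFD_pad _ _ _ _ (by simp; omega), pvCmp_symm]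
  · rw [if_neg (show ¬ (t1.length > t2.length) by omega),
        if_neg (show ¬ (t2.length > t1.length) by omega)]
    have := pvALoop_eq_revFD t1 t2 heqL t1.length le_rfl
    rw [List.take_length, List.take_of_length_le (by omega)] at this
    rw [this, show (t1.length : Int) - (t1.length : Int) + 1 = 1 by ring]
    have hpad := pvRevFD_pad t1.reverse t2.reverse 0 1 (by simp; omega)
    simpa using hpad
  · rw [if_pos (show t1.length > t2.length by omega)]
    have hlen2 : (List.replicate (t1.length - t2.length) '0' ++ t2).length = t1.length := by
      simp; omega
    rw [if_neg (show ¬ ((List.replicate (t1.length - t2.length) '0' ++ t2).length > t1.length) by omega)]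
    have := pvALoop_eq_revFD t1 (List.replicate (t1.length - t2.length) '0' ++ t2)
      (by rw [hlen2]) t1.length le_rfl
    rw [List.take_length, List.take_of_length_le (by rw [hlen2])] at this
    rw [this, show (t1.length : Int) - (t1.length : Int) + 1 = 1 by ring]
    rw [List.reverse_append, List.reverse_replicate]
    rw [pvRevFD_pad _ _ _ _ (by simp; omega)]

-- reverse of bin(u)[2:] for a nonnegative input, in terms of the LSB-first bit list
theorem pvBinDrop2_reverse (u : Nat) :
    (pvBinDrop2 (u : Int)).reverse = if u = 0 then ['0'] else pvBL u := by
  rw [pvBinDrop2, if_neg (by omega : ¬ ((u : Int) < 0))]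
  by_cases hu : u = 0
  · subst hu; simp
  · rw [if_neg (by omega : ¬ ((u : Int) = 0)), if_neg hu]
    rw [show ((u : Int)).toNat = u from Int.toNat_natCast u, pvNatBin_reverse]

theorem pvBL_zero : pvBL 0 = [] := by rw [pvBL]; simp

-- B's port in terms of the Nat xor
theorem pvAlt_eq (a b : Nat) :
    posOfRightMostDiffBit_alt (a : Int) (b : Int) =
      if a = b then -1 else pvRmLoop ((a ^^^ b : Nat) : Int) 1 := by
  rw [posOfRightMostDiffBit_alt]
  simp only [PySem.Int.bxor_natCast]
  by_cases hab : a = b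
  · subst hab; simp
  · have hx : a ^^^ b ≠ 0 := by simpa [Nat.xor_eq_zero_iff] using hab
    rw [if_neg (by exact_mod_cast hx), if_neg hab]

-- ===== VERDICT (by name: the statement is the Claim_ definition above) =====
theorem posOfRightMostDiffBit_spec : Claim_equal_posOfRightMostDiffBit := by
  intro m n hdom hpre
  obtain ⟨hm, hn⟩ := hpre
  obtain ⟨a, rfl⟩ := Int.eq_ofNat_of_zero_le hm
  obtain ⟨b, rfl⟩ := Int.eq_ofNat_of_zero_le hn
  unfold Spec_posOfRightMostDiffBit
  have hA : posOfRightMostDiffBit (a : Int) (b : Int) =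
      pvCmp (pvBinDrop2 (a : Int)).reverse (pvBinDrop2 (b : Int)).reverse 1 := by
    rw [posOfRightMostDiffBit]
    exact pvScan_eq_cmp _ _ _ _ rfl rfl
  rw [hA, pvAlt_eq, ← pvCmp_bl_eq_rmLoop, pvBinDrop2_reverse, pvBinDrop2_reverse]
  by_cases ha : a = 0 <;> by_cases hb : b = 0
  · rw [if_pos ha, if_pos hb, ha, hb, pvBL_zero]
    simp [pvCmp]
  · rw [if_pos ha, if_neg hb, pvCmp_zero_left, ha, pvBL_zero]
  · rw [if_neg ha, if_pos hb, pvCmp_symm, pvCmp_zero_left, hb, pvBL_zero, pvCmp_symm]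
  · rw [if_neg ha, if_neg hb]
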